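-- pv_equiv track=rewrite | github.com/Tulpana/ARC-AGI-2 | arc_agi_2_submission/ril/solver.py | _tile_grid_with_flips
-- ===== SOURCE A (Python) =====
-- from typing import Iterable, List, Dict, Tuple, Any, Optional, Sequence, Set, Mapping
--
-- Grid = List[List[int]]
--
-- def grid_shape(g: Grid) -> Tuple[int, int]:
--     return (len(g), len(g[0]) if g else 0)
--
-- def _tile_grid_with_flips(g: Grid, ht: int, wt: int, mode: str) -> Grid:
--     """Tiling variants that flip stripes to match training patterns."""
--
--     if not g or not g[0]:
--         return g
--
--     mode = mode.lower().strip()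
--     in_h, in_w = grid_shape(g)
--     result: Grid = []
--
--     for ty in range(ht):
--         row_flip = mode in {"rowflip", "checker"} and (ty % 2 == 1)
--         for r in range(in_h):
--             base_row = list(g[r])
--             if row_flip:
--                 base_row = list(reversed(base_row))
--             row: List[int] = []
--             for tx in range(wt):
--                 segment = base_row
--                 if mode == "checker" and ((ty + tx) % 2 == 1):
--                     segment = list(reversed(base_row))
--                 row.extend(segment)
--             result.append(row)
--
--     return result
-- ===== SOURCE B (Python) =====
-- from typing import List
--
-- Grid = List[List[int]]
--
--
-- def _checker_row(src: List[int], wt: int) -> List[int]: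
--     # one base-block row for checker mode: segment reversed exactly on odd tx
--     row: List[int] = []
--     for tx in range(wt):
--         row += src[::-1] if tx % 2 == 1 else src
--     return row
--
--
-- def _tile_grid_with_flips(g: Grid, ht: int, wt: int, mode: str) -> Grid:
--     if not g or not g[0]:
--         return g
--     if ht <= 0:
--         return []
--     m = mode.lower().strip()
--     if m == "checker":
--         # ty-independent: flipping the row for odd ty and re-flipping segments
--         # at odd (ty+tx) reduces to reversing segments at odd tx
--         block = [_checker_row(src, wt) for src in g]
--         blocks = [block for _ in range(ht)]
--     elif m == "rowflip":
--         wide = [src * wt for src in g]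
--         flipped = [src[::-1] * wt for src in g]
--         blocks = [flipped if ty % 2 == 1 else wide for ty in range(ht)]
--     else:
--         wide = [src * wt for src in g]
--         blocks = [wide for _ in range(ht)]
--     return [list(row) for block in blocks for row in block]
-- ===== Notes on version B (the rewrite author's own statement) =====
-- stated objective: alternative
-- what changed: B precomputes one base block per mode (using that checker's double reversal reduces to tx-parity alone, and list repetition for plain/rowflip tiles) and stacks ht copies of it, instead of A's triply nested per-cell loop recomputing every segment for every tile-row.
import Mathlib
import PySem

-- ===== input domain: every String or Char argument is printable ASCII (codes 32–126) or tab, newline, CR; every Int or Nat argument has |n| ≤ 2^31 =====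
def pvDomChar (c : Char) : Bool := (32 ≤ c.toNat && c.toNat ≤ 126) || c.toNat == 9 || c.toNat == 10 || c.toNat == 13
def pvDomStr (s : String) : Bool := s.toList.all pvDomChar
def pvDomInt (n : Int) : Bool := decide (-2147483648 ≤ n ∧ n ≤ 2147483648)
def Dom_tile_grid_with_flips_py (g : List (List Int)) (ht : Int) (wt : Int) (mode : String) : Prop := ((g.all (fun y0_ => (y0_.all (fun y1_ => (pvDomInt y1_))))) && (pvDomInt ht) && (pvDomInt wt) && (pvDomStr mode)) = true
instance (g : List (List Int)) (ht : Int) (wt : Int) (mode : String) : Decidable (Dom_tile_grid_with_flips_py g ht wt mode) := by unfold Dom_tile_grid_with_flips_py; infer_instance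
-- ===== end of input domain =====

-- B precomputes one base block per mode and stacks ht copies, instead of A's triply nested per-cell loop (objective: alternative decomposition; return-value equivalence — A returns g itself on the empty guard, B likewise).

-- ===== PORT A =====
def grid_shape_py (g : List (List Int)) : Int × Int :=
  ((g.length : Int), if g ≠ [] then ((g.headD []).length : Int) else 0)

def tile_grid_with_flips_py (g : List (List Int)) (ht : Int) (wt : Int) (mode : String) : List (List Int) :=
  if g = [] ∨ g.headD [] = [] then g
  else
    let m := PySem.Str.strip (PySem.Str.lower mode)
    let in_h := (grid_shape_py g).1
    (PySem.List.pyRange 0 ht 1).foldl (fun result ty =>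
      let row_flip := (m == "rowflip" || m == "checker") && (PySem.Int.mod ty 2 == 1)
      (PySem.List.pyRange 0 in_h 1).foldl (fun result r =>
        let base_row0 := PySem.List.pyGetD g r []
        let base_row := if row_flip then base_row0.reverse else base_row0
        let row := (PySem.List.pyRange 0 wt 1).foldl (fun row tx =>
          let segment := if m == "checker" && (PySem.Int.mod (ty + tx) 2 == 1) then base_row.reverse else base_row
          row ++ segment) ([] : List Int)
        result ++ [row]) result) ([] : List (List Int))

-- ===== PORT B =====
-- src * wt  (Python list repetition; empty for wt ≤ 0)
def pvRepeat (src : List Int) (wt : Int) : List Int := (List.replicate wt.toNat src).flatten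

-- one base-block row for checker mode: segment reversed exactly on odd tx
def pvCheckerRow (src : List Int) (wt : Int) : List Int :=
  (PySem.List.pyRange 0 wt 1).foldl (fun row tx =>
    row ++ (if PySem.Int.mod tx 2 == 1 then src.reverse else src)) ([] : List Int)

def tile_grid_with_flips_py_alt (g : List (List Int)) (ht : Int) (wt : Int) (mode : String) : List (List Int) :=
  if g = [] ∨ g.headD [] = [] then g
  else if ht ≤ 0 then []
  else
    let m := PySem.Str.strip (PySem.Str.lower mode)
    let blocks : List (List (List Int)) :=
      if m == "checker" then
        let block := g.map (fun src => pvCheckerRow src wt)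
        (PySem.List.pyRange 0 ht 1).map (fun _ => block)
      else if m == "rowflip" then
        let wide := g.map (fun src => pvRepeat src wt)
        let flipped := g.map (fun src => pvRepeat src.reverse wt)
        (PySem.List.pyRange 0 ht 1).map (fun ty => if PySem.Int.mod ty 2 == 1 then flipped else wide)
      else
        let wide := g.map (fun src => pvRepeat src wt)
        (PySem.List.pyRange 0 ht 1).map (fun _ => wide)
    blocks.flatMap (fun block => block.map (fun row => row))

-- ===== PRECONDITION & SPEC =====
def Spec_tile_grid_with_flips_py (g : List (List Int)) (ht : Int) (wt : Int) (mode : String) (out : List (List Int)) : Prop := out = tile_grid_with_flips_py_alt g ht wt mode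
instance (g : List (List Int)) (ht : Int) (wt : Int) (mode : String) (out : List (List Int)) : Decidable (Spec_tile_grid_with_flips_py g ht wt mode out) := by unfold Spec_tile_grid_with_flips_py; infer_instance

-- ===== CLAIM (what is proved, stated in full; the proofs are below) =====
def Claim_equal_tile_grid_with_flips_py : Prop := ∀ (g : List (List Int)) (ht : Int) (wt : Int) (mode : String), Dom_tile_grid_with_flips_py g ht wt mode → Spec_tile_grid_with_flips_py g ht wt mode (tile_grid_with_flips_py g ht wt mode)

-- ===== LEMMAS AND PROOFS =====

-- constant extension over a list is repetition-flatten
theorem pv_flatMap_const {α β : Type} (l : List α) (c : List β) :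
    l.flatMap (fun _ => c) = (List.replicate l.length c).flatten := by
  induction l with
  | nil => rfl
  | cons x xs ih => simp [List.flatMap_cons, List.replicate_succ, ih]

-- constant body fold over range(wt) is Python's list repetition src * wt
theorem pv_foldl_const (wt : Int) (c acc : List Int) :
    (PySem.List.pyRange 0 wt 1).foldl (fun row _ => row ++ c) acc = acc ++ pvRepeat c wt := by
  rw [PySem.List.foldl_append_eq_flatMap (fun _ => c) (PySem.List.pyRange 0 wt 1) acc,
      pv_flatMap_const, pvRepeat]
  simp [PySem.List.length_pyRange_one]

-- double-reversal parity reduction for checker: for 0 ≤ ty, 0 ≤ tx,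
-- flipping at odd ty then re-flipping at odd (ty+tx) is flipping at odd tx
theorem pv_checker_seg (src : List Int) (ty tx : Int) :
    (if PySem.Int.mod (ty + tx) 2 == 1 then
        (if PySem.Int.mod ty 2 == 1 then src.reverse else src).reverse
      else (if PySem.Int.mod ty 2 == 1 then src.reverse else src)) =
    (if PySem.Int.mod tx 2 == 1 then src.reverse else src) := by
  have h2 : (0:Int) < 2 := by norm_num
  simp only [PySem.Int.mod_eq_emod_of_pos h2]
  rcases Int.emod_two_eq_zero_or_one ty with h | h <;>
    rcases Int.emod_two_eq_zero_or_one tx with h' | h' <;>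
    (have hsum : (ty + tx) % 2 = (ty % 2 + tx % 2) % 2 := by omega) <;>
    simp [h, h', hsum]

theorem pv_flatMap_congr {α β : Type} {l : List α} {f g : α → List β}
    (h : ∀ x ∈ l, f x = g x) : l.flatMap f = l.flatMap g := by
  induction l with
  | nil => rfl
  | cons x xs ih =>
    simp only [List.flatMap_cons, h x (by simp), ih (fun y hy => h y (by simp [hy]))]

-- the inner r-loop appends one row per source row: it is result ++ g.map R
theorem pv_inner (g : List (List Int)) (R : List Int → List Int) (acc : List (List Int)) :
    (PySem.List.pyRange 0 (g.length : Int) 1).foldl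
        (fun result r => result ++ [R (PySem.List.pyGetD g r [])]) acc = acc ++ g.map R := by
  rw [PySem.List.foldl_pyRange_zero_pyGetD' g [] (fun a row => a ++ [R row]) acc,
      PySem.List.foldl_append_singleton_eq_map]

theorem tile_spec_aux (g : List (List Int)) (ht wt : Int) (mode : String) :
    tile_grid_with_flips_py g ht wt mode = tile_grid_with_flips_py_alt g ht wt mode := by
  by_cases hg : g = [] ∨ g.headD [] = []
  · unfold tile_grid_with_flips_py tile_grid_with_flips_py_alt
    rw [if_pos hg, if_pos hg]
  · unfold tile_grid_with_flips_py tile_grid_with_flips_py_alt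
    rw [if_neg hg, if_neg hg]
    by_cases hht : ht ≤ 0
    · rw [if_pos hht, PySem.List.pyRange_one_eq_nil (by omega : ht ≤ 0)]
      rfl
    rw [if_neg hht]
    simp only [grid_shape_py]
    set m := PySem.Str.strip (PySem.Str.lower mode) with hm
    -- rewrite A into a flatMap over tile-rows of per-source-row maps
    have hA : ∀ (acc : List (List Int)),
        (PySem.List.pyRange 0 ht 1).foldl (fun result ty =>
          (PySem.List.pyRange 0 (g.length : Int) 1).foldl (fun result r =>
            result ++ [(PySem.List.pyRange 0 wt 1).foldl (fun row tx =>
              row ++ (if m == "checker" && (PySem.Int.mod (ty + tx) 2 == 1) then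
                  (if (m == "rowflip" || m == "checker") && (PySem.Int.mod ty 2 == 1) then
                    (PySem.List.pyGetD g r []).reverse else PySem.List.pyGetD g r []).reverse
                else
                  (if (m == "rowflip" || m == "checker") && (PySem.Int.mod ty 2 == 1) then
                    (PySem.List.pyGetD g r []).reverse else PySem.List.pyGetD g r []))) []]) result) acc =
        acc ++ (PySem.List.pyRange 0 ht 1).flatMap (fun ty => g.map (fun src =>
          (PySem.List.pyRange 0 wt 1).foldl (fun row tx =>
            row ++ (if m == "checker" && (PySem.Int.mod (ty + tx) 2 == 1) then
                (if (m == "rowflip" || m == "checker") && (PySem.Int.mod ty 2 == 1) then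
                  src.reverse else src).reverse
              else
                (if (m == "rowflip" || m == "checker") && (PySem.Int.mod ty 2 == 1) then
                  src.reverse else src))) [])) := by
      intro acc
      rw [← PySem.List.foldl_append_eq_flatMap]
      apply PySem.List.foldl_congr_mem
      intro a ty _
      exact pv_inner g (fun src =>
        (PySem.List.pyRange 0 wt 1).foldl (fun row tx =>
          row ++ (if m == "checker" && (PySem.Int.mod (ty + tx) 2 == 1) then
              (if (m == "rowflip" || m == "checker") && (PySem.Int.mod ty 2 == 1) then
                src.reverse else src).reverse
            else
              (if (m == "rowflip" || m == "checker") && (PySem.Int.mod ty 2 == 1) then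
                src.reverse else src))) []) a
    rw [hA]
    simp only [List.nil_append, List.map_id']
    by_cases hc : m = "checker"
    · -- checker mode
      have hcb : (m == "checker") = true := by simp [hc]
      rw [if_pos hcb, List.flatMap_map]
      apply pv_flatMap_congr
      intro ty _
      apply List.map_congr_left
      intro src _
      unfold pvCheckerRow
      apply PySem.List.foldl_congr_mem
      intro a tx _
      simp only [hcb, Bool.or_true, Bool.true_and]
      rw [pv_checker_seg src ty tx]
    · have hcb : (m == "checker") = false := by simp [hc]
      rw [if_neg (by simp [hcb])]
      by_cases hr : m = "rowflip"
      · -- rowflip mode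
        have hrb : (m == "rowflip") = true := by simp [hr]
        rw [if_pos hrb, List.flatMap_map]
        apply pv_flatMap_congr
        intro ty _
        simp only [hcb, hrb, Bool.false_and, Bool.true_or, Bool.true_and,
          Bool.false_eq_true, if_false]
        by_cases hodd : (PySem.Int.mod ty 2 == 1) = true
        · rw [if_pos hodd]
          apply List.map_congr_left
          intro src _
          rw [if_pos hodd]
          simpa using pv_foldl_const wt src.reverse []
        · rw [if_neg hodd]
          apply List.map_congr_left
          intro src _
          rw [if_neg hodd]
          simpa using pv_foldl_const wt src []
      · -- plain tiling
        have hrb : (m == "rowflip") = false := by simp [hr]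
        rw [if_neg (by simp [hrb]), List.flatMap_map]
        apply pv_flatMap_congr
        intro ty _
        simp only [hcb, hrb, Bool.false_and, Bool.false_or,
          Bool.false_eq_true, if_false]
        apply List.map_congr_left
        intro src _
        simpa using pv_foldl_const wt src []

-- ===== VERDICT (by name: the statement is the Claim_ definition above) =====
theorem tile_grid_with_flips_py_spec : Claim_equal_tile_grid_with_flips_py := by
  intro g ht wt mode _
  exact tile_spec_aux g ht wt mode
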